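-- pv_equiv track=rewrite | github.com/surajkumar5454/file-tracking-system | app/utils/hierarchy.py | get_subordinate_roles
-- ===== SOURCE A (Python) =====
-- ROLE_HIERARCHY = {
--     'BRANCH_DIARY': ['ESTATE_OFFICER'],
--     'ESTATE_OFFICER': ['BUDGET_OFFICER'],
--     'BUDGET_OFFICER': ['IFA'],
--     'IFA': ['EE'],
--     'EE': ['SE'],
--     'SE': ['DIG'],
--     'DIG': ['ADG'],
--     'ADG': ['DG'],
--     'DG': []  # Top of hierarchy
-- }
--
-- def get_subordinate_roles(role_name):
--     """Get all roles that report to this role"""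
--     if not role_name:
--         return []
--
--     subordinates = []
--     role_name = role_name.upper()
--
--     def get_subordinates(current_role):
--         for role, superiors in ROLE_HIERARCHY.items():
--             if current_role in superiors:
--                 subordinates.append(role)
--                 get_subordinates(role)
--
--     get_subordinates(role_name)
--     return subordinates
-- ===== SOURCE B (Python) =====
-- ROLE_HIERARCHY = {
--     'BRANCH_DIARY': ['ESTATE_OFFICER'],
--     'ESTATE_OFFICER': ['BUDGET_OFFICER'],
--     'BUDGET_OFFICER': ['IFA'],
--     'IFA': ['EE'],
--     'EE': ['SE'],
--     'SE': ['DIG'],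
--     'DIG': ['ADG'],
--     'ADG': ['DG'],
--     'DG': []
-- }
--
-- def get_subordinate_roles(role_name):
--     """Get all roles that report to this role"""
--     if not role_name:
--         return []
--     # One pass: reverse adjacency map (superior -> direct reports)
--     reports = {}
--     for role, superiors in ROLE_HIERARCHY.items():
--         for sup in superiors:
--             reports.setdefault(sup, []).append(role)
--     # Index-driven DFS walk from the requested role
--     result = []
--     stack = [role_name.upper()]
--     while stack:
--         current = stack.pop()
--         for child in reports.get(current, []):
--             result.append(child)
--             stack.append(child)
--     return result
-- ===== Notes on version B (the rewrite author's own statement) =====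
-- stated objective: alternative
-- what changed: A repeatedly rescans the whole ROLE_HIERARCHY dict once per reached role via nested recursion; B builds a reverse adjacency map (superior -> direct reports) in one pass and then does a single index-driven stack walk that never rescans the dict.
import Mathlib
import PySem

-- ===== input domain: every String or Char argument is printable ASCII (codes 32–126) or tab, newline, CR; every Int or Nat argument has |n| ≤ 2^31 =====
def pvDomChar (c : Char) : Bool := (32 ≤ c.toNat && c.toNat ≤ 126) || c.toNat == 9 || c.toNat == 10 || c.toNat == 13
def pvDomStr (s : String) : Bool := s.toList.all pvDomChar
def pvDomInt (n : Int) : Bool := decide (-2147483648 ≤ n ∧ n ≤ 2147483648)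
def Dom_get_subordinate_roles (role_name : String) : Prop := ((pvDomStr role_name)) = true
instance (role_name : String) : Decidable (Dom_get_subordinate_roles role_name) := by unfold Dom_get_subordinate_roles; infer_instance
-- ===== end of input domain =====

-- B replaces A's per-level rescans of ROLE_HIERARCHY by a reverse adjacency map built once
-- plus a single stack-driven walk (objective: idiomatic/alternative; return value only, no mutation).

-- ===== PORT A =====
-- the module constant ROLE_HIERARCHY, in insertion order (shared by both ports)
def roleHierarchy : List (String × List String) :=
  [("BRANCH_DIARY", ["ESTATE_OFFICER"]),
   ("ESTATE_OFFICER", ["BUDGET_OFFICER"]),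
   ("BUDGET_OFFICER", ["IFA"]),
   ("IFA", ["EE"]),
   ("EE", ["SE"]),
   ("SE", ["DIG"]),
   ("DIG", ["ADG"]),
   ("ADG", ["DG"]),
   ("DG", [])]

-- A's nested 'get_subordinates' recursion; the fuel only makes the recursion total:
-- the hierarchy is a 9-role chain, so depth never reaches 10 and the fuel never runs out.
def goA : Nat → String → List String → List String
  | 0, _, subordinates => subordinates
  | fuel + 1, current_role, subordinates =>
      roleHierarchy.foldl
        (fun subs p => if p.2.contains current_role then goA fuel p.1 (subs ++ [p.1]) else subs)
        subordinates

def get_subordinate_roles (role_name : String) : List String :=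
  if role_name = "" then []      -- 'if not role_name'
  else goA 10 (PySem.Str.upper role_name) []

-- ===== PORT B =====
-- reverse adjacency map: superior -> direct reports (Source B's setdefault/append loop)
def reportsMap : PySem.Dict String (List String) :=
  roleHierarchy.foldl
    (fun d p => p.2.foldl (fun d2 sup => d2.insert sup (d2.getD sup [] ++ [p.1])) d)
    PySem.Dict.empty

-- Source B's 'while stack' loop; fuel only makes it total (each pop is matched by at most
-- one push per reached role, and at most 9 roles are ever reached).
def goB : Nat → List String → List String → List String
  | 0, _, result => result
  | fuel + 1, stack, result =>
      match PySem.List.pop? stack (-1) with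
      | none => result
      | some (current, rest) =>
          let children := reportsMap.getD current []
          let p := children.foldl (fun q c => (q.1 ++ [c], q.2 ++ [c])) (rest, result)
          goB fuel p.1 p.2

def get_subordinate_roles_alt (role_name : String) : List String :=
  if role_name = "" then []
  else goB 20 [PySem.Str.upper role_name] []

-- ===== PRECONDITION & SPEC =====
def Spec_get_subordinate_roles (role_name : String) (out : List String) : Prop := out = get_subordinate_roles_alt role_name
instance (role_name : String) (out : List String) : Decidable (Spec_get_subordinate_roles role_name out) := by unfold Spec_get_subordinate_roles; infer_instance

-- ===== CLAIM (what is proved, stated in full; the proofs are below) =====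
def Claim_equal_get_subordinate_roles : Prop := ∀ (role_name : String), Dom_get_subordinate_roles role_name → Spec_get_subordinate_roles role_name (get_subordinate_roles role_name)

-- ===== LEMMAS AND PROOFS =====

theorem foldl_if_false {α β : Type} (l : List α) (c : α → Bool) (g : β → α → β) (acc : β)
    (h : ∀ p ∈ l, c p = false) :
    l.foldl (fun a p => if c p then g a p else a) acc = acc := by
  induction l generalizing acc with
  | nil => rfl
  | cons x xs ih =>
      simp only [List.foldl, h x (by simp)]
      simpa using ih _ (fun p hp => h p (by simp [hp]))

theorem key_lemma (u : String) : goA 10 u [] = goB 20 [u] [] := by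
  by_cases h1 : u = "ESTATE_OFFICER"; · subst h1; decide
  by_cases h2 : u = "BUDGET_OFFICER"; · subst h2; decide
  by_cases h3 : u = "IFA"; · subst h3; decide
  by_cases h4 : u = "EE"; · subst h4; decide
  by_cases h5 : u = "SE"; · subst h5; decide
  by_cases h6 : u = "DIG"; · subst h6; decide
  by_cases h7 : u = "ADG"; · subst h7; decide
  by_cases h8 : u = "DG"; · subst h8; decide
  -- u matches no superior: both sides return []
  have hmem : ∀ p ∈ roleHierarchy, (p.2.contains u) = false := by
    intro p hp
    fin_cases hp <;> simp_all
  have eA : goA 10 u [] = roleHierarchy.foldl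
      (fun subs p => if p.2.contains u then goA 9 p.1 (subs ++ [p.1]) else subs) [] := rfl
  have cA : goA 10 u [] = [] := by
    rw [eA]; exact foldl_if_false _ _ _ _ hmem
  have hget : reportsMap.getD u [] = [] := by
    have hrm : reportsMap = ⟨[("ESTATE_OFFICER", ["BRANCH_DIARY"]), ("BUDGET_OFFICER", ["ESTATE_OFFICER"]),
      ("IFA", ["BUDGET_OFFICER"]), ("EE", ["IFA"]), ("SE", ["EE"]), ("DIG", ["SE"]),
      ("ADG", ["DIG"]), ("DG", ["ADG"])]⟩ := by rfl
    rw [hrm]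
    simp [PySem.Dict.getD_eq_get?_getD, PySem.Dict.get?,
      Ne.symm h1, Ne.symm h2, Ne.symm h3, Ne.symm h4, Ne.symm h5, Ne.symm h6, Ne.symm h7, Ne.symm h8]
  have cB : goB 20 [u] [] = [] := by
    have eB : goB 20 [u] [] = goB 19
        ((reportsMap.getD u []).foldl (fun q c => (q.1 ++ [c], q.2 ++ [c])) ([], [])).1
        ((reportsMap.getD u []).foldl (fun q c => (q.1 ++ [c], q.2 ++ [c])) ([], [])).2 := rfl
    rw [eB, hget]
    rfl
  rw [cA, cB]

-- ===== VERDICT (by name: the statement is the Claim_ definition above) =====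
theorem get_subordinate_roles_spec : Claim_equal_get_subordinate_roles := by
  intro role_name _
  unfold Spec_get_subordinate_roles get_subordinate_roles get_subordinate_roles_alt
  split
  · rfl
  · exact key_lemma _
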